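-- pv_equiv track=rewrite | github.com/EfranorQM/AURIA | src/infra/catalog_repo.py | _parse_qualities
-- ===== SOURCE A (Python) =====
-- from typing import Iterable, List, Set
--
-- def _parse_qualities(csv: str) -> List[int]:
--     parts = [p.strip() for p in (csv or "").split(",") if p.strip()]
--     out: List[int] = []
--     for p in parts:
--         n = int(p)
--         if n < 1 or n > 5:
--             # mantenemos 1..5 (Normal..Masterpiece)
--             continue
--         out.append(n)
--     return sorted(set(out)) or [1, 2, 3, 4, 5]
-- ===== SOURCE B (Python) =====
-- def _parse_qualities(csv):
--     mask = 0
--     for part in (csv or "").split(","):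
--         token = part.strip()
--         if token:
--             n = int(token)
--             if 0 <= n - 1 <= 4:
--                 mask |= 1 << (n - 1)
--     if mask == 0:
--         mask = 0b11111
--     result = []
--     q = 1
--     while mask:
--         if mask & 1:
--             result.append(q)
--         mask >>= 1
--         q += 1
--     return result
-- ===== Notes on version B (the rewrite author's own statement) =====
-- stated objective: alternative
-- what changed: B replaces A's list-collect + sorted(set(...)) + 'or' fallback with a 5-bit bitmask: each in-range value sets bit n-1 in an integer, an empty mask is replaced by 0b11111, and the result is decoded by shifting the mask bit by bit, so no list, set, sort or dedup pass exists.
import Mathlib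
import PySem

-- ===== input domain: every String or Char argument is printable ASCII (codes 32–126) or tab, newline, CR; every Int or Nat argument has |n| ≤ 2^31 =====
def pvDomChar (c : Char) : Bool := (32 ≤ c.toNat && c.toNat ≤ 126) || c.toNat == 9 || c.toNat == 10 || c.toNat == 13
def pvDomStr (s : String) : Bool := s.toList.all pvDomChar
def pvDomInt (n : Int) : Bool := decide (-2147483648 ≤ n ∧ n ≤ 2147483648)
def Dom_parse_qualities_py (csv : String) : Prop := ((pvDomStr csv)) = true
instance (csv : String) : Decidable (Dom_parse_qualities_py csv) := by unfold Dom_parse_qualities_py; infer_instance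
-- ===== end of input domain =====

-- B replaces A's list + sorted(set(...)) + `or` fallback by a 5-bit bitmask (bit n-1 set when
-- value n appears; an empty mask becomes 0b11111) decoded by shifting; equivalence on Pre_ (all tokens parse).

-- ===== PORT A =====
-- s.split(",") is PySem.Str.split?; the separator is the nonempty literal ",", so getD never fires.
def parse_qualities_py (csv : String) : List Int :=
  let parts := (((PySem.Str.split? csv ",").getD []).map PySem.Str.strip).filter (fun p => p ≠ "")
  let out := parts.foldl (fun out p =>
    match PySem.Int.ofStr? p with   -- int(p); Pre_ guarantees some (none = ValueError)
    | none => out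
    | some n => if n < 1 ∨ n > 5 then out else out ++ [n]) ([] : List Int)
  let r := PySem.List.sorted (PySem.Set.ofList out) (fun x => x) false
  if r = [] then [1, 2, 3, 4, 5] else r

-- ===== PORT B =====
-- Python's `mask` is always a nonnegative integer (only bits 0..4 ever set), so it is carried as a Nat.
def pvDecode (mask : Nat) (q : Int) : List Int :=
  if mask = 0 then []
  else (if mask % 2 = 1 then [q] else []) ++ pvDecode (mask / 2) (q + 1)
decreasing_by exact Nat.div_lt_self (Nat.pos_of_ne_zero (by assumption)) (by omega)

def parse_qualities_py_alt (csv : String) : List Int :=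
  let mask := ((PySem.Str.split? csv ",").getD []).foldl (fun m part =>
    let token := PySem.Str.strip part
    if token = "" then m
    else match PySem.Int.ofStr? token with   -- int(token); Pre_ guarantees some
      | none => m
      | some n => if 0 ≤ n - 1 ∧ n - 1 ≤ 4 then m ||| (1 <<< (n - 1).toNat) else m) (0 : Nat)
  let mask := if mask = 0 then 31 else mask
  pvDecode mask 1

-- ===== PRECONDITION & SPEC =====
-- Pre_ excludes exactly the inputs where int() raises ValueError in both programs:
-- some comma-separated token, after stripping, is non-empty but not a Python integer literal.
def Pre_parse_qualities_py (csv : String) : Prop :=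
  ∀ p ∈ (PySem.Str.split? csv ",").getD [],
    PySem.Str.strip p ≠ "" → (PySem.Int.ofStr? (PySem.Str.strip p)).isSome
instance (csv : String) : Decidable (Pre_parse_qualities_py csv) := by
  unfold Pre_parse_qualities_py; infer_instance
def pvWitness_parse_qualities_py : String := " 3 ,1,9,,2"

def Spec_parse_qualities_py (csv : String) (out : List Int) : Prop := out = parse_qualities_py_alt csv
instance (csv : String) (out : List Int) : Decidable (Spec_parse_qualities_py csv out) := by unfold Spec_parse_qualities_py; infer_instance

-- ===== CLAIM (what is proved, stated in full; the proofs are below) =====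
def Claim_equal_parse_qualities_py : Prop := ∀ (csv : String), Dom_parse_qualities_py csv → Pre_parse_qualities_py csv → Spec_parse_qualities_py csv (parse_qualities_py csv)

-- ===== LEMMAS AND PROOFS =====

-- A's loop body over the pre-stripped, pre-filtered parts
def pvStepA (out : List Int) (p : String) : List Int :=
  match PySem.Int.ofStr? p with
  | none => out
  | some n => if n < 1 ∨ n > 5 then out else out ++ [n]

-- B's loop body over the raw split
def pvStepB (m : Nat) (part : String) : Nat :=
  let token := PySem.Str.strip part
  if token = "" then m
  else match PySem.Int.ofStr? token with
    | none => m
    | some n => if 0 ≤ n - 1 ∧ n - 1 ≤ 4 then m ||| (1 <<< (n - 1).toNat) else m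

-- B's mask step seen on A's parts list (strip / empty-drop already done)
def pvStepM (m : Nat) (p : String) : Nat :=
  match PySem.Int.ofStr? p with
  | none => m
  | some n => if 0 ≤ n - 1 ∧ n - 1 ≤ 4 then m ||| (1 <<< (n - 1).toNat) else m

-- the list of in-range parsed values, in order
def pvKept (parts : List String) : List Int :=
  parts.filterMap (fun p => match PySem.Int.ofStr? p with
    | none => none
    | some n => if 1 ≤ n ∧ n ≤ 5 then some n else none)


-- reduction lemmas for the two step functions and for pvKept on a cons
lemma pvStepM_none (m : Nat) (p : String) (h : PySem.Int.ofStr? p = none) :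
    pvStepM m p = m := by unfold pvStepM; rw [h]

lemma pvStepM_some_in (m : Nat) (p : String) (n : Int) (h : PySem.Int.ofStr? p = some n)
    (hr : 0 ≤ n - 1 ∧ n - 1 ≤ 4) : pvStepM m p = m ||| (1 <<< (n - 1).toNat) := by
  unfold pvStepM; rw [h]; exact if_pos hr

lemma pvStepM_some_out (m : Nat) (p : String) (n : Int) (h : PySem.Int.ofStr? p = some n)
    (hr : ¬ (0 ≤ n - 1 ∧ n - 1 ≤ 4)) : pvStepM m p = m := by
  unfold pvStepM; rw [h]; exact if_neg hr

lemma pvKept_cons_none (p : String) (parts : List String) (h : PySem.Int.ofStr? p = none) :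
    pvKept (p :: parts) = pvKept parts := by
  unfold pvKept; rw [List.filterMap_cons]; simp [h]

lemma pvKept_cons_in (p : String) (parts : List String) (n : Int)
    (h : PySem.Int.ofStr? p = some n) (hr : 1 ≤ n ∧ n ≤ 5) :
    pvKept (p :: parts) = n :: pvKept parts := by
  unfold pvKept; rw [List.filterMap_cons]; simp [h, hr]

lemma pvKept_cons_out (p : String) (parts : List String) (n : Int)
    (h : PySem.Int.ofStr? p = some n) (hr : ¬ (1 ≤ n ∧ n ≤ 5)) :
    pvKept (p :: parts) = pvKept parts := by
  unfold pvKept; rw [List.filterMap_cons]; simp [h, hr]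

-- B's single fold over the raw split equals folding the mask step over A's parts list
lemma pvFoldB_reshape (l : List String) (m : Nat) :
    l.foldl pvStepB m
      = ((l.map PySem.Str.strip).filter (fun p => p ≠ "")).foldl pvStepM m := by
  induction l generalizing m with
  | nil => rfl
  | cons a l ih =>
      simp only [List.foldl_cons, List.map_cons, List.filter_cons]
      by_cases h : PySem.Str.strip a = ""
      · simp [pvStepB, h, ih]
      · simp [pvStepB, pvStepM, h, ih]

-- A's fold appends exactly the kept values
lemma pvFoldA_eq_kept (parts : List String) (acc : List Int) :
    parts.foldl pvStepA acc = acc ++ pvKept parts := by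
  induction parts generalizing acc with
  | nil => simp [pvKept]
  | cons p parts ih =>
      simp only [List.foldl_cons]
      cases h : PySem.Int.ofStr? p with
      | none =>
          rw [show pvStepA acc p = acc by unfold pvStepA; rw [h],
            pvKept_cons_none p parts h, ih]
      | some n =>
          by_cases hr : 1 ≤ n ∧ n ≤ 5
          · have hr' : ¬ (n < 1 ∨ n > 5) := by omega
            rw [show pvStepA acc p = acc ++ [n] by unfold pvStepA; rw [h]; exact if_neg hr',
              pvKept_cons_in p parts n h hr, ih]
            simp
          · have hr' : n < 1 ∨ n > 5 := by omega
            rw [show pvStepA acc p = acc by unfold pvStepA; rw [h]; exact if_pos hr',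
              pvKept_cons_out p parts n h hr, ih]

-- each bit of the mask fold records membership of its value in the kept list
lemma pvMask_testBit (parts : List String) (m : Nat) (k : Nat) :
    (parts.foldl pvStepM m).testBit k
      = (m.testBit k || decide (((k : Int) + 1) ∈ pvKept parts)) := by
  induction parts generalizing m with
  | nil => simp [pvKept]
  | cons p parts ih =>
      simp only [List.foldl_cons]
      cases h : PySem.Int.ofStr? p with
      | none => rw [pvStepM_none m p h, pvKept_cons_none p parts h, ih]
      | some n =>
          by_cases hr : 1 ≤ n ∧ n ≤ 5
          · have hr' : 0 ≤ n - 1 ∧ n - 1 ≤ 4 := by omega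
            rw [pvStepM_some_in m p n h hr', pvKept_cons_in p parts n h hr, ih]
            have h1 : (1 : Nat) <<< (n - 1).toNat = 2 ^ (n - 1).toNat := by
              simp [Nat.shiftLeft_eq]
            simp only [Nat.testBit_or, h1, Nat.testBit_two_pow, List.mem_cons]
            by_cases hk2 : (n - 1).toNat = k
            · have hn : (k : Int) + 1 = n := by omega
              have hk2' : n.toNat - 1 = k := by omega
              simp [hk2, hn]
            · have hn : ¬ ((k : Int) + 1 = n) := by omega
              have hk2' : ¬ (n.toNat - 1 = k) := by omega
              simp [hk2', hn]
          · have hr' : ¬ (0 ≤ n - 1 ∧ n - 1 ≤ 4) := by omega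
            rw [pvStepM_some_out m p n h hr', pvKept_cons_out p parts n h hr, ih]

-- the mask fold stays below 2^5
lemma pvMask_lt (parts : List String) (m : Nat) (hm : m < 32) :
    parts.foldl pvStepM m < 32 := by
  induction parts generalizing m with
  | nil => exact hm
  | cons p parts ih =>
      apply ih
      cases h : PySem.Int.ofStr? p with
      | none => rw [pvStepM_none m p h]; exact hm
      | some n =>
          by_cases hr : 0 ≤ n - 1 ∧ n - 1 ≤ 4
          · rw [pvStepM_some_in m p n h hr]
            have h1 : (1 : Nat) <<< (n - 1).toNat < 32 := by
              have hle : (n - 1).toNat ≤ 4 := by omega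
              calc (1 : Nat) <<< (n - 1).toNat = 2 ^ (n - 1).toNat := by
                    simp [Nat.shiftLeft_eq]
                _ ≤ 2 ^ 4 := Nat.pow_le_pow_right (by norm_num) hle
                _ < 32 := by norm_num
            exact Nat.or_lt_two_pow (n := 5) hm h1
          · rw [pvStepM_some_out m p n h hr]; exact hm

-- decoding any 5-bit mask probes bits 0..4 in order; a zero mask is exactly an empty probe
lemma pvDecode_eq_probe : ∀ mask < 32,
    (pvDecode mask 1
        = ([1, 2, 3, 4, 5] : List Int).filter (fun n => mask.testBit (n - 1).toNat))
    ∧ ((mask = 0) ↔ ([1, 2, 3, 4, 5] : List Int).filter (fun n => mask.testBit (n - 1).toNat) = []) := by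
  intro mask h
  interval_cases mask <;> exact ⟨by simp [pvDecode] <;> decide, by decide⟩

-- the sorted deduped list equals probing the fixed domain for membership
lemma pvSorted_eq_probe (out : List Int) (hr : ∀ x ∈ out, 1 ≤ x ∧ x ≤ 5) :
    PySem.List.sorted (PySem.Set.ofList out) (fun x => x) false
      = ([1, 2, 3, 4, 5] : List Int).filter (fun n => decide (n ∈ out)) := by
  apply PySem.List.sorted_eq_of_perm_of_pairwise_lt
  · rw [List.perm_ext_iff_of_nodup]
    · intro a
      constructor
      · intro ha
        have h1 := (List.mem_filter.mp ha).2
        exact (PySem.Set.mem_ofList out a).mpr (of_decide_eq_true h1)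
      · intro ha
        have ha' : a ∈ out := (PySem.Set.mem_ofList out a).mp ha
        apply List.mem_filter.mpr
        refine ⟨?_, by simp [ha']⟩
        have := hr a ha'
        have h15 : a = 1 ∨ a = 2 ∨ a = 3 ∨ a = 4 ∨ a = 5 := by omega
        simp [h15]
    · exact List.Nodup.filter _ (by decide)
    · exact PySem.Set.nodup_ofList out
  · exact List.Pairwise.filter _ (by decide)

-- ===== VERDICT (by name: the statement is the Claim_ definition above) =====
theorem parse_qualities_py_spec : Claim_equal_parse_qualities_py := by
  intro csv _ _
  unfold Spec_parse_qualities_py parse_qualities_py parse_qualities_py_alt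
  simp only []
  set raw := (PySem.Str.split? csv ",").getD [] with hraw
  set parts := (raw.map PySem.Str.strip).filter (fun p => p ≠ "") with hparts
  set mask := parts.foldl pvStepM 0 with hmask
  have hBfold : raw.foldl (fun m part =>
      let token := PySem.Str.strip part
      if token = "" then m
      else match PySem.Int.ofStr? token with
        | none => m
        | some n => if 0 ≤ n - 1 ∧ n - 1 ≤ 4 then m ||| (1 <<< (n - 1).toNat) else m) (0 : Nat)
      = mask := by
    have h := pvFoldB_reshape raw 0
    rw [hmask, hparts]
    rw [← h]
    rfl
  have hAfold : parts.foldl (fun out p =>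
      match PySem.Int.ofStr? p with
      | none => out
      | some n => if n < 1 ∨ n > 5 then out else out ++ [n]) ([] : List Int)
      = pvKept parts := by
    have h := pvFoldA_eq_kept parts []
    rw [show (fun out p =>
      match PySem.Int.ofStr? p with
      | none => out
      | some n => if n < 1 ∨ n > 5 then out else out ++ [n]) = pvStepA from rfl, h]
    simp
  have hkrange : ∀ x ∈ pvKept parts, 1 ≤ x ∧ x ≤ 5 := by
    intro x hx
    unfold pvKept at hx
    obtain ⟨p, _, hp⟩ := List.mem_filterMap.mp hx
    cases h : PySem.Int.ofStr? p with
    | none => simp [h] at hp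
    | some n =>
        by_cases hr : 1 ≤ n ∧ n ≤ 5
        · simp [h, hr] at hp
          omega
        · simp [h, hr] at hp
  have hmlt : mask < 32 := pvMask_lt parts 0 (by norm_num)
  have hprobe : ([1, 2, 3, 4, 5] : List Int).filter (fun n => mask.testBit (n - 1).toNat)
      = ([1, 2, 3, 4, 5] : List Int).filter (fun n => decide (n ∈ pvKept parts)) := by
    apply List.filter_congr
    intro n hn
    have h15 : 1 ≤ n ∧ n ≤ 5 := by fin_cases hn <;> norm_num
    have hbit := pvMask_testBit parts 0 ((n - 1).toNat)
    simp only [Nat.zero_testBit, Bool.false_or] at hbit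
    have hcast : (((n - 1).toNat : Nat) : Int) + 1 = n := by omega
    rw [hmask, hbit, hcast]
  have hsorted := pvSorted_eq_probe (pvKept parts) hkrange
  have hdec := pvDecode_eq_probe mask hmlt
  rw [hBfold, hAfold, hsorted, ← hprobe]
  by_cases hz : mask = 0
  · have hEmpty : ([1, 2, 3, 4, 5] : List Int).filter (fun n => mask.testBit (n - 1).toNat) = [] :=
      (hdec.2).mp hz
    rw [hEmpty, if_pos rfl, if_pos hz]
    have h31 := (pvDecode_eq_probe 31 (by norm_num)).1
    rw [h31]
    decide
  · have hne : ([1, 2, 3, 4, 5] : List Int).filter (fun n => mask.testBit (n - 1).toNat) ≠ [] := by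
      intro hc; exact hz ((hdec.2).mpr hc)
    rw [if_neg hne, if_neg hz, hdec.1]
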